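-- pv_equiv track=rewrite | github.com/Ian-Hennessy/Math-Functions | peaks.py | plateau
-- ===== SOURCE A (Python) =====
-- def find_next(arr: list) -> int:
--     length = len(arr) - 1
--
--     for i in range(0, length):
--         if arr[i+1] != arr[i]:
--             return int(arr[i+1])
--             break
--
-- def plateau(arr: list) -> list:
--     positions = []
--     for i in range(1, len(arr) - 1):
--         if arr[i] == arr[i+1] and arr[i] > arr[i-1]:
--             next_int = find_next(arr[i:])
--             if arr[i] > next_int:
--                 positions.append(i)
--     return positions
-- ===== SOURCE B (Python) =====
-- def plateau(arr: list) -> list: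
--     # One backward pass precomputes the next distinct value to the right of
--     # each index; then each candidate index is tested in O(1).
--     n = len(arr)
--     nxt = [None] * n
--     for i in range(n - 2, -1, -1):
--         nxt[i] = arr[i + 1] if arr[i + 1] != arr[i] else nxt[i + 1]
--     return [i for i in range(1, n - 1)
--             if arr[i] == arr[i + 1] and arr[i - 1] < arr[i]
--             and nxt[i] is not None and nxt[i] < arr[i]]
-- ===== Notes on version B (the rewrite author's own statement) =====
-- stated objective: alternative
-- what changed: Replaces A's per-candidate forward rescan (find_next on the slice arr[i:]) with a single backward pass that precomputes the next distinct value to the right of every index, looked up in O(1) per candidate.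
import Mathlib
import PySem

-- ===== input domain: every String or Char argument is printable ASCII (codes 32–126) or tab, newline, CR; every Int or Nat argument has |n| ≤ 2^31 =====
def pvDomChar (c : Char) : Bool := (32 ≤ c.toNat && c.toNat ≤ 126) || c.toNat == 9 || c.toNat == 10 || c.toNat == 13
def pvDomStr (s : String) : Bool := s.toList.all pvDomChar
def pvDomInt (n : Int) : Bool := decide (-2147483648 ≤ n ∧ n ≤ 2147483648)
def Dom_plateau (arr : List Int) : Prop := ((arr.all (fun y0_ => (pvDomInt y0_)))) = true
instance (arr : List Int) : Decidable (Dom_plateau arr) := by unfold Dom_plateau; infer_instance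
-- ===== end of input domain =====

-- B replaces A's per-candidate forward rescan (find_next on a fresh slice arr[i:]) by one
-- backward pass that precomputes the next distinct value to the right of every index.

-- ===== PORT A =====
-- find_next: scans i = 0 .. len-2, returns arr[i+1] at the first consecutive change,
-- falls off the loop (Python: returns None) if the list is constant.
-- range(0, len(arr)-1) → List.range' 0 (arr.length - 1); all indices are in range,
-- so List.getD is exact here.
def findNextGo (arr : List Int) : List Nat → Option Int
  | [] => none
  | i :: is =>
      if arr.getD (i+1) 0 ≠ arr.getD i 0 then some (arr.getD (i+1) 0)
      else findNextGo arr is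

def find_next (arr : List Int) : Option Int :=
  findNextGo arr (List.range' 0 (arr.length - 1))

-- plateau's loop over range(1, len(arr)-1) → List.range' 1 (arr.length - 2);
-- arr[i:] with i ≥ 0 → arr.drop i (exact). Where Python compares arr[i] > None and
-- raises TypeError (find_next returned None), those inputs are excluded by Pre_plateau.
def plateauGo (arr : List Int) : List Nat → List Int → List Int
  | [], acc => acc
  | i :: is, acc =>
      if arr.getD i 0 = arr.getD (i+1) 0 ∧ arr.getD (i-1) 0 < arr.getD i 0 then
        match find_next (arr.drop i) with
        | some nxt => plateauGo arr is (if nxt < arr.getD i 0 then acc ++ [(i : Int)] else acc)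
        | none => plateauGo arr is acc  -- Python raises TypeError here; outside Pre_plateau
      else plateauGo arr is acc

def plateau (arr : List Int) : List Int :=
  plateauGo arr (List.range' 1 (arr.length - 2)) []

-- ===== PORT B =====
-- buildNxt arr = B's `nxt` array (next distinct value to the right, or None),
-- built by the same backward recurrence: nxt[i] = arr[i+1] if it differs, else nxt[i+1].
def buildNxt : List Int → List (Option Int)
  | [] => []
  | [_] => [none]
  | a :: b :: rest =>
      let ns := buildNxt (b :: rest)
      (if b ≠ a then some b else ns.headD none) :: ns

-- B's list comprehension over range(1, n-1) with its four-clause condition.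
def plateau_alt (arr : List Int) : List Int :=
  let nxt := buildNxt arr
  ((List.range' 1 (arr.length - 2)).filter (fun i =>
      decide (arr.getD i 0 = arr.getD (i+1) 0) &&
      decide (arr.getD (i-1) 0 < arr.getD i 0) &&
      (match nxt.getD i none with
       | some m => decide (m < arr.getD i 0)
       | none => false))).map (fun i => (i : Int))

-- ===== PRECONDITION & SPEC =====
-- Pre_ excludes exactly the inputs on which Python A raises TypeError: some index i in
-- range(1, len-1) starts a rising plateau that extends to the end of the array, so
-- find_next(arr[i:]) returns None and `arr[i] > None` raises.
def Pre_plateau (arr : List Int) : Prop :=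
  ∀ i ∈ List.range' 1 (arr.length - 2),
    ¬ (arr.getD (i-1) 0 < arr.getD i 0 ∧
       ∀ j ∈ List.range' i (arr.length - i), arr.getD j 0 = arr.getD i 0)

instance (arr : List Int) : Decidable (Pre_plateau arr) := by unfold Pre_plateau; infer_instance

def pvWitness_plateau : List Int := [1, 2, 2, 1]

def Spec_plateau (arr : List Int) (out : List Int) : Prop := out = plateau_alt arr
instance (arr : List Int) (out : List Int) : Decidable (Spec_plateau arr out) := by unfold Spec_plateau; infer_instance

-- ===== CLAIM (what is proved, stated in full; the proofs are below) =====
def Claim_equal_plateau : Prop := ∀ (arr : List Int), Dom_plateau arr → Pre_plateau arr → Spec_plateau arr (plateau arr)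

-- ===== LEMMAS AND PROOFS =====

-- Proof-side view of find_next: scan consecutive pairs.
def consecNext : List Int → Option Int
  | [] => none
  | [_] => none
  | a :: b :: t => if b ≠ a then some b else consecNext (b :: t)

-- Proof-side view of B's nxt: first value different from v.
def nextDiff (v : Int) : List Int → Option Int
  | [] => none
  | x :: xs => if x ≠ v then some x else nextDiff v xs

lemma findNextGo_range' (l : List Int) (m k : Nat) (h : k + m + 1 = l.length) :
    findNextGo l (List.range' k m) = consecNext (l.drop k) := by
  induction m generalizing k with
  | zero =>
      have hk : k < l.length := by omega
      have hlen : (l.drop k).length = 1 := by simp; omega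
      match hd : l.drop k with
      | [x] => simp [findNextGo, consecNext]
      | [] => simp [hd] at hlen
      | x :: y :: t => simp [hd] at hlen
  | succ m ih =>
      have hk : k < l.length := by omega
      have hk1 : k + 1 < l.length := by omega
      have hd1 : l.drop k = l[k] :: l.drop (k+1) := List.drop_eq_getElem_cons hk
      have hd2 : l.drop (k+1) = l[k+1] :: l.drop (k+2) := List.drop_eq_getElem_cons hk1
      have g1 : l.getD k 0 = l[k] := List.getD_eq_getElem l 0 hk
      have g2 : l.getD (k+1) 0 = l[k+1] := List.getD_eq_getElem l 0 hk1
      rw [List.range'_succ]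
      simp only [findNextGo, g1, g2, hd1, hd2, consecNext]
      by_cases hne : l[k+1] ≠ l[k]
      · simp [hne]
      · simp only [hne, ite_false]
        rw [ih (k+1) (by omega), hd2]

lemma consecNext_eq_nextDiff (a : Int) (t : List Int) :
    consecNext (a :: t) = nextDiff a t := by
  induction t generalizing a with
  | nil => simp [consecNext, nextDiff]
  | cons b t ih =>
      simp only [consecNext, nextDiff]
      by_cases hne : b ≠ a
      · simp [hne]
      · push_neg at hne
        subst hne
        simp [ih]

lemma find_next_drop (arr : List Int) (i : Nat) (h : i < arr.length) :
    find_next (arr.drop i) = nextDiff arr[i] (arr.drop (i+1)) := by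
  have hd : arr.drop i = arr[i] :: arr.drop (i+1) := List.drop_eq_getElem_cons h
  unfold find_next
  rw [findNextGo_range' (arr.drop i) ((arr.drop i).length - 1) 0
      (by simp; omega)]
  simp only [List.drop_zero]
  rw [hd, consecNext_eq_nextDiff]

lemma buildNxt_getD (arr : List Int) (i : Nat) (h : i < arr.length) :
    (buildNxt arr).getD i none = nextDiff (arr.getD i 0) (arr.drop (i+1)) := by
  induction arr generalizing i with
  | nil => simp at h
  | cons a rest ih =>
      match rest, i with
      | [], 0 => simp [buildNxt, nextDiff]
      | [], i+1 => simp at h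
      | b :: t, 0 =>
          simp only [buildNxt, List.getD_cons_zero, List.drop_succ_cons, List.drop_zero,
            nextDiff]
          by_cases hne : b ≠ a
          · simp [hne]
          · rw [if_neg hne, if_neg hne]
            push_neg at hne
            rw [← hne]
            have h0 := ih 0 (by simp)
            simp only [List.getD_cons_zero, List.drop_succ_cons, List.drop_zero] at h0
            cases hb : buildNxt (b :: t) with
            | nil => rw [hb] at h0; simpa using h0
            | cons x xs => rw [hb] at h0; simpa using h0
      | b :: t, i+1 =>
          have h' : i < (b :: t).length := by
            simp only [List.length_cons] at h ⊢
            omega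
          have hrec := ih i h'
          simpa [buildNxt] using hrec

lemma plateauGo_eq (arr : List Int) (is : List Nat) (acc : List Int)
    (h : ∀ i ∈ is, i < arr.length) :
    plateauGo arr is acc =
      acc ++ (is.filter (fun i =>
        decide (arr.getD i 0 = arr.getD (i+1) 0) &&
        decide (arr.getD (i-1) 0 < arr.getD i 0) &&
        (match (buildNxt arr).getD i none with
         | some m => decide (m < arr.getD i 0)
         | none => false))).map (fun i => (i : Int)) := by
  induction is generalizing acc with
  | nil => simp [plateauGo]
  | cons i is ih =>
      have hi : i < arr.length := h i (by simp)
      have hrest : ∀ j ∈ is, j < arr.length := fun j hj => h j (by simp [hj])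
      have hfn : find_next (arr.drop i) = (buildNxt arr).getD i none := by
        rw [find_next_drop arr i hi, buildNxt_getD arr i hi,
            List.getD_eq_getElem arr 0 hi]
      by_cases hc1 : arr[i]?.getD 0 = arr[i+1]?.getD 0
      · by_cases hc2 : arr[i-1]?.getD 0 < arr[i]?.getD 0
        · cases hnx : (buildNxt arr)[i]?.getD none with
          | none =>
              simp only [plateauGo, List.getD_eq_getElem?_getD, hfn, hnx,
                List.filter_cons]
              rw [if_pos ⟨hc1, hc2⟩, ih _ hrest]
              simp [hnx, List.getD_eq_getElem?_getD, decide_eq_true hc1,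
                decide_eq_true hc2]
          | some m =>
              by_cases hm : m < arr[i]?.getD 0
              · simp only [plateauGo, List.getD_eq_getElem?_getD, hfn, hnx,
                  List.filter_cons]
                rw [if_pos ⟨hc1, hc2⟩, if_pos hm, ih _ hrest]
                simp [List.getD_eq_getElem?_getD, decide_eq_true hc1,
                  decide_eq_true hc2, decide_eq_true hm]
              · simp only [plateauGo, List.getD_eq_getElem?_getD, hfn, hnx,
                  List.filter_cons]
                rw [if_pos ⟨hc1, hc2⟩, if_neg hm, ih _ hrest]
                simp [List.getD_eq_getElem?_getD, decide_eq_true hc1,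
                  decide_eq_false hm, decide_eq_true hc2]
        · simp only [plateauGo, List.getD_eq_getElem?_getD, hfn, List.filter_cons]
          rw [if_neg (fun hand => hc2 hand.2), ih _ hrest]
          simp [List.getD_eq_getElem?_getD, decide_eq_false hc2]
      · simp only [plateauGo, List.getD_eq_getElem?_getD, hfn, List.filter_cons]
        rw [if_neg (fun hand => hc1 hand.1), ih _ hrest]
        simp [List.getD_eq_getElem?_getD, decide_eq_false hc1]

-- ===== VERDICT (by name: the statement is the Claim_ definition above) =====
theorem plateau_spec : Claim_equal_plateau := by
  intro arr _ _
  unfold Spec_plateau plateau plateau_alt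
  rw [plateauGo_eq]
  · simp
  · intro i hi
    have := List.mem_range'_1.mp hi
    omega
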